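-- pv_equiv track=rewrite | github.com/ChinomnsoC/data-structure-algorithms | depth_first_search/tallest_tree_root.py | tallest_tree_root_variation
-- ===== SOURCE A (Python) =====
-- def tallest_tree_root_variation(forest: dict) -> int:
--     if not forest:
--         return 0
--
--     children = set(forest.keys())
--     all_nodes = set(forest.keys()) | set(forest.values())
--
--     roots = all_nodes - children
--
--     # build the adjacency list
--     adj_list = {}
--
--     for child, parent in forest.items():
--         if parent not in adj_list:
--             adj_list[parent] = []
--
--         adj_list[parent].append(child)
--
--     # write the dfs recursion
--     def dfs_height(node, adj_list):
--         # check if node in adj_list -- do something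
--         if node not in adj_list:
--             return 1
--         # check if child is in adj list
--         # can replace with this
--         # return 1 + max(dfs_height(child, adj_list) for child in adj_list[node])
--         max_height = 0
--         for child in adj_list[node]:
--             max_height = max(max_height, dfs_height(child, adj_list))
--         return 1 + max_height
--
--     root_map = {}
--     for root in roots:
--         height = dfs_height(root, adj_list)
--         root_map[root] = height
--
--     max_root_height = max(root_map.values())
--
--     ties = []
--     for root, height in root_map.items():
--         if height == max_root_height:
--             ties.append(root)
--
--     return min(ties)
-- ===== SOURCE B (Python) =====
-- def tallest_tree_root_variation(forest: dict) -> int: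
--     if not forest:
--         return 0
--     n = len(forest)
--     best = None  # (depth, root)
--     for node in set(forest) | set(forest.values()):
--         cur = node
--         depth = 1
--         for _ in range(n):  # an acyclic parent chain follows at most n links
--             if cur not in forest:
--                 break
--             cur = forest[cur]
--             depth += 1
--         if best is None or depth > best[0] or (depth == best[0] and cur < best[1]):
--             best = (depth, cur)
--     return best[1]
-- ===== Notes on version B (the rewrite author's own statement) =====
-- stated objective: alternative
-- what changed: Instead of building an adjacency list and recursing top-down over each root's tree (A), B walks upward through the parent map from every node, counting steps to its root, and keeps a single running lexicographic best (max depth, then min root); it trades A's adjacency dict and recursion for simple bounded upward walks.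
-- outside the precondition, e.g. on tallest_tree_root_variation({1: 2, 2: 1, 3: 4}): A returns 4, B returns 1
import Mathlib
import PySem

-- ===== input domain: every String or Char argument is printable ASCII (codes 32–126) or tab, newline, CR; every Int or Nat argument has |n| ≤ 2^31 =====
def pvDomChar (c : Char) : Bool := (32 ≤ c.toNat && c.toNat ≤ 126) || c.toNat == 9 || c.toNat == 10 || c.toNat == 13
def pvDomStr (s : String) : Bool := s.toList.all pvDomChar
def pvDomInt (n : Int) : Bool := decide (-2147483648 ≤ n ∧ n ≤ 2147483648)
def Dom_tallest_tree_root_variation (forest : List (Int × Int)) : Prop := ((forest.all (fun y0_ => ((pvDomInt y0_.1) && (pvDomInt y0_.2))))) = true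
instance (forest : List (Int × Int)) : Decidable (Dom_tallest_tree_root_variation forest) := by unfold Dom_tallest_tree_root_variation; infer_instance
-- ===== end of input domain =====

-- B replaces A's adjacency list + top-down recursion by bounded upward walks through the
-- parent map with one running lexicographic best (alternative decomposition, not faster).

-- ===== PORT A =====
-- dfs_height, with a fuel argument making the recursion structural; fuel forest.length+1
-- is never exhausted on inputs satisfying Pre_ (proved below).
mutual
def dfsA (adj : PySem.Dict Int (List Int)) : Nat → Int → Int
  | 0, _ => 1
  | fuel+1, node =>
    if adj.contains node = false then 1
    else 1 + dfsAKids adj fuel (adj.getD node []) 0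
termination_by f _ => (f, 0)
def dfsAKids (adj : PySem.Dict Int (List Int)) : Nat → List Int → Int → Int
  | _, [], maxh => maxh
  | fuel, c :: cs, maxh => dfsAKids adj fuel cs (max maxh (dfsA adj fuel c))
termination_by f l _ => (f, l.length + 1)
end

def tallest_tree_root_variation (forest : List (Int × Int)) : Int :=
  if forest = [] then 0
  else
    let children := PySem.Set.ofList (forest.map (·.1))
    let all_nodes := PySem.Set.union (PySem.Set.ofList (forest.map (·.1))) (forest.map (·.2))
    let roots := PySem.Set.diff all_nodes children
    let adj_list := forest.foldl (fun a p => a.modify p.2 [] (fun l => l ++ [p.1]))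
      (PySem.Dict.empty : PySem.Dict Int (List Int))
    let root_map := roots.foldl (fun rm r => rm.insert r (dfsA adj_list (forest.length + 1) r))
      (PySem.Dict.empty : PySem.Dict Int Int)
    let max_root_height := match PySem.List.max? root_map.values (fun v => v) with
      | some m => m
      | none => 0      -- unreachable under Pre_: Python's max(…) raises on an empty sequence
    let ties := root_map.items.foldl
      (fun acc p => if p.2 == max_root_height then acc ++ [p.1] else acc) ([] : List Int)
    match PySem.List.min? ties (fun v => v) with
    | some m => m
    | none => 0        -- unreachable under Pre_: ties is nonempty

-- ===== PORT B =====
-- the bounded upward walk: 'for _ in range(n): if cur not in forest: break; cur = forest[cur]; depth += 1'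
def climbB (forest : List (Int × Int)) : Nat → Int → Int → Int × Int
  | 0, cur, depth => (cur, depth)
  | f+1, cur, depth =>
    match (PySem.Dict.mk forest).get? cur with
    | none => (cur, depth)
    | some p => climbB forest f p (depth + 1)

def tallest_tree_root_variation_alt (forest : List (Int × Int)) : Int :=
  if forest = [] then 0
  else
    let nodes := PySem.Set.union (PySem.Set.ofList (forest.map (·.1))) (forest.map (·.2))
    let best := nodes.foldl (fun best node =>
      let p := climbB forest forest.length node 1
      match best with
      | none => some (p.2, p.1)
      | some q => if p.2 > q.1 ∨ (p.2 = q.1 ∧ p.1 < q.2) then some (p.2, p.1) else some q)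
      (none : Option (Int × Int))
    match best with
    | some q => q.2
    | none => 0

-- ===== PRECONDITION & SPEC =====
def pvStep (forest : List (Int × Int)) (v : Int) : Int := (PySem.Dict.mk forest).getD v v
def pvUp (forest : List (Int × Int)) (e : Nat) (v : Int) : Int := (pvStep forest)^[e] v

-- Pre_ excludes association lists with duplicate keys (a Python dict can never hold them, so
-- such a list is not the image of any dict input) and parent maps containing a cycle (not a
-- forest: A happens to return a value when the cycle is unreachable from every root, while the
-- natural upward walk's bounded result there is equally arbitrary; both behaviours on such
-- invalid input are accidental).
def Pre_tallest_tree_root_variation (forest : List (Int × Int)) : Prop :=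
  (forest.map (·.1)).Nodup ∧
  ∀ p ∈ forest, pvUp forest forest.length p.1 ∉ forest.map (·.1)

instance (forest : List (Int × Int)) : Decidable (Pre_tallest_tree_root_variation forest) := by
  unfold Pre_tallest_tree_root_variation; infer_instance

def pvWitness_tallest_tree_root_variation : (List (Int × Int)) := [(1, 3), (2, 3)]

def Spec_tallest_tree_root_variation (forest : List (Int × Int)) (out : Int) : Prop := out = tallest_tree_root_variation_alt forest
instance (forest : List (Int × Int)) (out : Int) : Decidable (Spec_tallest_tree_root_variation forest out) := by unfold Spec_tallest_tree_root_variation; infer_instance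

-- ===== CLAIM (what is proved, stated in full; the proofs are below) =====
def Claim_equal_tallest_tree_root_variation : Prop := ∀ (forest : List (Int × Int)), Dom_tallest_tree_root_variation forest → Pre_tallest_tree_root_variation forest → Spec_tallest_tree_root_variation forest (tallest_tree_root_variation forest)

-- ===== LEMMAS AND PROOFS =====

-- proof-side vocabulary: valid upward chains, their maximal length into a node
def pvVC (forest : List (Int × Int)) (v : Int) (e : Nat) (x : Int) : Bool :=
  (pvUp forest e v == x) && decide (∀ i < e, pvUp forest i v ∈ forest.map (·.1))

def pvEx (forest : List (Int × Int)) (e : Nat) (x : Int) : Bool :=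
  (x :: forest.map (·.1)).any (fun v => pvVC forest v e x)

def pvMC (forest : List (Int × Int)) (x : Int) : Nat :=
  ((List.range (forest.length + 1)).filter (fun e => pvEx forest e x)).foldr max 0

def pvAdj (forest : List (Int × Int)) : PySem.Dict Int (List Int) :=
  forest.foldl (fun a p => a.modify p.2 [] (fun l => l ++ [p.1])) PySem.Dict.empty

theorem l_get?_of_not_mem (forest : List (Int × Int)) (v : Int)
    (h : v ∉ forest.map (·.1)) : (PySem.Dict.mk forest).get? v = none := by
  rw [PySem.Dict.get?_eq_none_iff_not_mem_keys]
  simpa [PySem.Dict.keys_mk] using h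

theorem l_get?_of_mem (forest : List (Int × Int)) (v : Int)
    (h : v ∈ forest.map (·.1)) : (PySem.Dict.mk forest).get? v = some (pvStep forest v) := by
  cases hg : (PySem.Dict.mk forest).get? v with
  | none =>
    rw [PySem.Dict.get?_eq_none_iff_not_mem_keys] at hg
    exact absurd (by simpa [PySem.Dict.keys_mk] using h) hg
  | some w =>
    have : pvStep forest v = w := PySem.Dict.getD_of_get?_eq_some _ v hg
    rw [this]

theorem l_get?_iff_mem (forest : List (Int × Int)) (hnd : (forest.map (·.1)).Nodup)
    (c x : Int) : (PySem.Dict.mk forest).get? c = some x ↔ (c, x) ∈ forest := by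
  rw [PySem.Dict.get?_eq_some_iff_mem_items _ _ _ (by simpa [PySem.Dict.keys_mk] using hnd)]

theorem l_up_succ (forest : List (Int × Int)) (e : Nat) (v : Int) :
    pvUp forest (e+1) v = pvUp forest e (pvStep forest v) := by
  simp [pvUp, Function.iterate_succ_apply]

theorem l_up_succ' (forest : List (Int × Int)) (e : Nat) (v : Int) :
    pvUp forest (e+1) v = pvStep forest (pvUp forest e v) := by
  simp [pvUp, Function.iterate_succ_apply']

theorem l_VC_iff (forest : List (Int × Int)) (v : Int) (e : Nat) (x : Int) :
    pvVC forest v e x = true ↔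
      (pvUp forest e v = x ∧ ∀ i < e, pvUp forest i v ∈ forest.map (·.1)) := by
  simp [pvVC]

theorem l_bound (forest : List (Int × Int))
    (hac : ∀ p ∈ forest, pvUp forest forest.length p.1 ∉ forest.map (·.1))
    (v : Int) (e : Nat) (x : Int) (h : pvVC forest v e x = true) : e ≤ forest.length := by
  rw [l_VC_iff] at h
  by_contra hgt
  have hgt' : forest.length < e := Nat.lt_of_not_le hgt
  have h0 : pvUp forest 0 v ∈ forest.map (·.1) := h.2 0 (by omega)
  have hn : pvUp forest forest.length v ∈ forest.map (·.1) := h.2 forest.length hgt'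
  simp only [pvUp, Function.iterate_zero, id_eq] at h0
  obtain ⟨p, hp, hp1⟩ := List.mem_map.mp h0
  exact hac p hp (by rw [hp1]; exact hn)

theorem l_extend (forest : List (Int × Int)) (v c x : Int) (e : Nat)
    (hc : (PySem.Dict.mk forest).get? c = some x) (h : pvVC forest v e c = true) :
    pvVC forest v (e+1) x = true := by
  rw [l_VC_iff] at h ⊢
  have hcK : c ∈ forest.map (·.1) := by
    by_contra hK
    rw [l_get?_of_not_mem forest c hK] at hc
    simp at hc
  have hstep : pvStep forest c = x := PySem.Dict.getD_of_get?_eq_some _ c hc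
  constructor
  · rw [l_up_succ', h.1, hstep]
  · intro i hi
    rcases Nat.lt_succ_iff_lt_or_eq.mp hi with hlt | rfl
    · exact h.2 i hlt
    · rw [h.1]; exact hcK

theorem l_split (forest : List (Int × Int)) (v x : Int) (e : Nat)
    (h : pvVC forest v (e+1) x = true) :
    ∃ c, (PySem.Dict.mk forest).get? c = some x ∧ pvVC forest v e c = true := by
  rw [l_VC_iff] at h
  refine ⟨pvUp forest e v, ?_, ?_⟩
  · rw [l_get?_of_mem forest _ (h.2 e (Nat.lt_succ_self e)), ← l_up_succ', h.1]
  · rw [l_VC_iff]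
    exact ⟨rfl, fun i hi => h.2 i (Nat.lt_succ_of_lt hi)⟩

theorem l_ex_zero (forest : List (Int × Int)) (x : Int) : pvEx forest 0 x = true := by
  simp [pvEx, pvVC, pvUp]

theorem l_foldr_max_le (l : List Nat) (b : Nat) (h : ∀ a ∈ l, a ≤ b) :
    l.foldr max 0 ≤ b := by
  induction l with
  | nil => simp
  | cons a t ih =>
    simp only [List.foldr_cons]
    exact max_le (h a (List.mem_cons_self)) (ih fun x hx => h x (List.mem_cons_of_mem a hx))

theorem l_le_foldr_max (l : List Nat) (a : Nat) (h : a ∈ l) : a ≤ l.foldr max 0 := by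
  induction l with
  | nil => simp at h
  | cons x t ih =>
    simp only [List.foldr_cons]
    rcases List.mem_cons.mp h with rfl | hmem
    · exact le_max_left _ _
    · exact le_trans (ih hmem) (le_max_right _ _)

theorem l_foldr_max_mem (l : List Nat) : l.foldr max 0 = 0 ∨ l.foldr max 0 ∈ l := by
  induction l with
  | nil => simp
  | cons a t ih =>
    simp only [List.foldr_cons]
    rcases le_total a (t.foldr max 0) with hle | hle
    · rw [max_eq_right hle]
      rcases ih with h0 | hmem
      · exact Or.inl h0
      · exact Or.inr (List.mem_cons_of_mem a hmem)
    · rw [max_eq_left hle]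
      exact Or.inr List.mem_cons_self

theorem l_src (forest : List (Int × Int)) (v : Int) (e : Nat) (x : Int)
    (h : pvVC forest v e x = true) : v ∈ x :: forest.map (·.1) := by
  rw [l_VC_iff] at h
  cases e with
  | zero =>
    have : v = x := by simpa [pvUp] using h.1
    simp [this]
  | succ e =>
    exact List.mem_cons_of_mem x (by simpa [pvUp] using h.2 0 (Nat.succ_pos e))

theorem l_MC_le (forest : List (Int × Int)) (x : Int) : pvMC forest x ≤ forest.length := by
  unfold pvMC
  apply l_foldr_max_le
  intro a ha
  have := (List.mem_filter.mp ha).1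
  simp only [List.mem_range] at this
  omega

theorem l_MC_ex (forest : List (Int × Int)) (x : Int) :
    pvEx forest (pvMC forest x) x = true := by
  rcases l_foldr_max_mem ((List.range (forest.length + 1)).filter (fun e => pvEx forest e x)) with h0 | hmem
  · unfold pvMC
    rw [h0]
    exact l_ex_zero forest x
  · exact (List.mem_filter.mp hmem).2

theorem l_le_MC (forest : List (Int × Int))
    (hac : ∀ p ∈ forest, pvUp forest forest.length p.1 ∉ forest.map (·.1))
    (e : Nat) (x : Int) (h : pvEx forest e x = true) : e ≤ pvMC forest x := by
  have hbound : e ≤ forest.length := by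
    obtain ⟨v, _, hv⟩ := List.any_eq_true.mp h
    exact l_bound forest hac v e x hv
  unfold pvMC
  exact l_le_foldr_max _ e (List.mem_filter.mpr ⟨List.mem_range.mpr (by omega), h⟩)

theorem l_MC_child (forest : List (Int × Int))
    (hac : ∀ p ∈ forest, pvUp forest forest.length p.1 ∉ forest.map (·.1))
    (c x : Int) (hc : (PySem.Dict.mk forest).get? c = some x) :
    pvMC forest c < pvMC forest x := by
  obtain ⟨v, _, hv⟩ := List.any_eq_true.mp (l_MC_ex forest c)
  have hext : pvVC forest v (pvMC forest c + 1) x = true := l_extend forest v c x _ hc hv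
  have hsrc : v ∈ x :: forest.map (·.1) := l_src forest v _ x hext
  have : pvEx forest (pvMC forest c + 1) x = true :=
    List.any_eq_true.mpr ⟨v, hsrc, hext⟩
  have := l_le_MC forest hac _ x this
  omega

theorem l_exit (forest : List (Int × Int))
    (hac : ∀ p ∈ forest, pvUp forest forest.length p.1 ∉ forest.map (·.1))
    (v : Int) : ∃ e r, pvVC forest v e r = true ∧ r ∉ forest.map (·.1) ∧ e ≤ forest.length := by
  by_cases hv : v ∈ forest.map (·.1)
  · obtain ⟨p, hp, hp1⟩ := List.mem_map.mp hv
    have hex : ∃ i, pvUp forest i v ∉ forest.map (·.1) :=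
      ⟨forest.length, by rw [← hp1]; exact hac p hp⟩
    refine ⟨Nat.find hex, pvUp forest (Nat.find hex) v, ?_, Nat.find_spec hex, ?_⟩
    · rw [l_VC_iff]
      refine ⟨rfl, fun i hi => ?_⟩
      by_contra hnot
      exact Nat.find_min hex hi hnot
    · exact Nat.find_le (by rw [← hp1]; exact hac p hp)
  · refine ⟨0, v, ?_, hv, by omega⟩
    rw [l_VC_iff]
    exact ⟨rfl, by omega⟩

theorem l_adj_getD (forest : List (Int × Int)) (x : Int) :
    (pvAdj forest).getD x [] = (forest.filter (fun p => p.2 == x)).map (·.1) := by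
  have h1 : pvAdj forest = (forest.map Prod.swap).foldl
      (fun d p => d.modify p.1 [] (fun l => l ++ [p.2])) PySem.Dict.empty := by
    rw [List.foldl_map]
    rfl
  rw [h1, PySem.Dict.getD_foldl_modify_append]
  simp [List.filter_map, Function.comp_def, List.map_map]

theorem l_adj_contains (forest : List (Int × Int)) (x : Int) :
    (pvAdj forest).contains x = true ↔ x ∈ forest.map (·.2) := by
  rw [PySem.Dict.contains_iff_mem_keys]
  unfold pvAdj
  rw [PySem.Dict.keys_foldl_modify_key forest (fun p => p.2) [] (fun _ p => fun l => l ++ [p.1])]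
  simp [PySem.Dict.keys_empty, PySem.Set.update_nil_left, PySem.Set.mem_ofList]

theorem l_child_iff (forest : List (Int × Int)) (hnd : (forest.map (·.1)).Nodup) (c x : Int) :
    c ∈ (forest.filter (fun p => p.2 == x)).map (·.1) ↔
      (PySem.Dict.mk forest).get? c = some x := by
  rw [l_get?_iff_mem forest hnd]
  constructor
  · rintro hm
    obtain ⟨p, hp, hp1⟩ := List.mem_map.mp hm
    obtain ⟨hpf, hpx⟩ := List.mem_filter.mp hp
    have : p = (c, x) := by
      obtain ⟨a, b⟩ := p
      simp only at hp1
      simp only [beq_iff_eq] at hpx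
      simp [hp1, hpx]
    rw [← this]; exact hpf
  · intro hm
    exact List.mem_map.mpr ⟨(c, x), List.mem_filter.mpr ⟨hm, by simp⟩, rfl⟩

theorem l_kids_foldl (adj : PySem.Dict Int (List Int)) (f : Nat) (l : List Int) (m : Int) :
    dfsAKids adj f l m = l.foldl (fun m c => max m (dfsA adj f c)) m := by
  induction l generalizing m with
  | nil => simp [dfsAKids]
  | cons c cs ih => simp [dfsAKids, ih]

theorem l_foldl_max_le (l : List Int) (a b : Int) (h1 : a ≤ b) (h2 : ∀ x ∈ l, x ≤ b) :
    l.foldl max a ≤ b := by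
  induction l generalizing a with
  | nil => simpa using h1
  | cons x t ih =>
    simp only [List.foldl_cons]
    exact ih (max a x) (max_le h1 (h2 x List.mem_cons_self)) (fun y hy => h2 y (List.mem_cons_of_mem x hy))

theorem l_dfs (forest : List (Int × Int)) (hnd : (forest.map (·.1)).Nodup)
    (hac : ∀ p ∈ forest, pvUp forest forest.length p.1 ∉ forest.map (·.1)) :
    ∀ f x, pvMC forest x < f → dfsA (pvAdj forest) f x = 1 + (pvMC forest x : Int) := by
  intro f
  induction f with
  | zero => intro x hx; exact absurd hx (Nat.not_lt_zero _)
  | succ f ih =>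
    intro x hx
    by_cases hcont : (pvAdj forest).contains x = true
    · -- node has children
      have hne : dfsA (pvAdj forest) (f+1) x
          = 1 + dfsAKids (pvAdj forest) f ((pvAdj forest).getD x []) 0 := by
        rw [dfsA]
        rw [if_neg (by simp [hcont])]
      rw [hne, l_kids_foldl, l_adj_getD]
      -- each child's recursive value
      have hcong : ((forest.filter (fun p => p.2 == x)).map (·.1)).foldl
            (fun m c => max m (dfsA (pvAdj forest) f c)) 0
          = ((forest.filter (fun p => p.2 == x)).map (·.1)).foldl
            (fun m c => max m (1 + (pvMC forest c : Int))) 0 := by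
        apply PySem.List.foldl_congr_mem
        intro acc c hc
        have hget : (PySem.Dict.mk forest).get? c = some x := (l_child_iff forest hnd c x).mp hc
        have hlt : pvMC forest c < pvMC forest x := l_MC_child forest hac c x hget
        rw [ih c (by omega)]
      rw [hcong, ← List.foldl_map (f := fun c => 1 + (pvMC forest c : Int)) (g := max)]
      -- the maximum over children is pvMC x
      have hub : (((forest.filter (fun p => p.2 == x)).map (·.1)).map
            (fun c => 1 + (pvMC forest c : Int))).foldl max 0 ≤ (pvMC forest x : Int) := by
        apply l_foldl_max_le
        · positivity
        · intro y hy
          obtain ⟨c, hc, rfl⟩ := List.mem_map.mp hy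
          have hget : (PySem.Dict.mk forest).get? c = some x := (l_child_iff forest hnd c x).mp hc
          have := l_MC_child forest hac c x hget
          omega
      have hone : 1 ≤ pvMC forest x := by
        obtain ⟨p, hp, hpx⟩ := by
          have hxv : x ∈ forest.map (·.2) := (l_adj_contains forest x).mp hcont
          exact List.mem_map.mp hxv
        have hget : (PySem.Dict.mk forest).get? p.1 = some x := by
          rw [l_get?_iff_mem forest hnd]
          have : (p.1, x) = p := by rw [← hpx]
          rw [this]; exact hp
        have hchain0 : pvVC forest p.1 0 p.1 = true := by
          rw [l_VC_iff]; exact ⟨rfl, by omega⟩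
        have hchain1 : pvVC forest p.1 1 x = true := l_extend forest p.1 p.1 x 0 hget hchain0
        exact l_le_MC forest hac 1 x (List.any_eq_true.mpr ⟨p.1, l_src forest p.1 1 x hchain1, hchain1⟩)
      have hlb : (pvMC forest x : Int) ≤ (((forest.filter (fun p => p.2 == x)).map (·.1)).map
            (fun c => 1 + (pvMC forest c : Int))).foldl max 0 := by
        obtain ⟨v, _, hv⟩ := List.any_eq_true.mp (l_MC_ex forest x)
        obtain ⟨m, hm⟩ : ∃ m, pvMC forest x = m + 1 := ⟨pvMC forest x - 1, by omega⟩
        rw [hm] at hv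
        obtain ⟨c, hget, hvc⟩ := l_split forest v x m hv
        have hcch : c ∈ (forest.filter (fun p => p.2 == x)).map (·.1) :=
          (l_child_iff forest hnd c x).mpr hget
        have hmc : m ≤ pvMC forest c :=
          l_le_MC forest hac m c (List.any_eq_true.mpr ⟨v, l_src forest v m c hvc, hvc⟩)
        have helem : (1 + (pvMC forest c : Int)) ∈ (((forest.filter (fun p => p.2 == x)).map (·.1)).map
            (fun c => 1 + (pvMC forest c : Int))) := List.mem_map.mpr ⟨c, hcch, rfl⟩
        have hle := (PySem.List.le_foldl_max (((forest.filter (fun p => p.2 == x)).map (·.1)).map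
            (fun c => 1 + (pvMC forest c : Int))) 0).2 _ helem
        have : (pvMC forest x : Int) ≤ 1 + (pvMC forest c : Int) := by
          rw [hm]; push_cast; omega
        omega
      have := le_antisymm hub hlb
      rw [← this]
    · -- leaf
      have hleaf : dfsA (pvAdj forest) (f+1) x = 1 := by
        rw [dfsA]
        rw [if_pos (by simpa using hcont)]
      have hzero : pvMC forest x = 0 := by
        by_contra hnz
        obtain ⟨m, hm⟩ : ∃ m, pvMC forest x = m + 1 := ⟨pvMC forest x - 1, by omega⟩
        obtain ⟨v, _, hv⟩ := List.any_eq_true.mp (l_MC_ex forest x)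
        rw [hm] at hv
        obtain ⟨c, hget, _⟩ := l_split forest v x m hv
        have : (c, x) ∈ forest := (l_get?_iff_mem forest hnd c x).mp hget
        have : x ∈ forest.map (·.2) := List.mem_map.mpr ⟨(c, x), this, rfl⟩
        exact hcont ((l_adj_contains forest x).mpr this)
      rw [hleaf, hzero]
      simp

theorem l_climb (forest : List (Int × Int)) :
    ∀ f (v : Int) (e : Nat) (r t : Int), pvVC forest v e r = true → r ∉ forest.map (·.1) →
      e ≤ f → climbB forest f v t = (r, t + (e : Int)) := by
  intro f
  induction f with
  | zero =>
    intro v e r t h hr he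
    have he0 : e = 0 := by omega
    subst he0
    rw [l_VC_iff] at h
    have : v = r := by simpa [pvUp] using h.1
    simp [climbB, this]
  | succ f ih =>
    intro v e r t h hr he
    cases e with
    | zero =>
      rw [l_VC_iff] at h
      have hvr : v = r := by simpa [pvUp] using h.1
      subst hvr
      simp [climbB, l_get?_of_not_mem forest v hr]
    | succ e =>
      have hvK : v ∈ forest.map (·.1) := by
        rw [l_VC_iff] at h
        simpa [pvUp] using h.2 0 (Nat.succ_pos e)
      have hchain : pvVC forest (pvStep forest v) e r = true := by
        rw [l_VC_iff] at h ⊢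
        constructor
        · rw [← l_up_succ]; exact h.1
        · intro i hi
          rw [← l_up_succ]
          exact h.2 (i+1) (by omega)
      have := ih (pvStep forest v) e r (t+1) hchain hr (by omega)
      simp only [climbB, l_get?_of_mem forest v hvK]
      rw [this]
      have : t + 1 + (e : Int) = t + ((e : Nat) + 1 : Nat) := by push_cast; ring
      rw [this]

theorem l_root_val (forest : List (Int × Int)) (v r : Int) (e : Nat)
    (h : pvVC forest v e r = true) (_hr : r ∉ forest.map (·.1)) :
    r = v ∨ r ∈ forest.map (·.2) := by
  cases e with
  | zero =>
    rw [l_VC_iff] at h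
    exact Or.inl (by simpa [pvUp] using h.1.symm)
  | succ e =>
    rw [l_VC_iff] at h
    have hu : pvUp forest e v ∈ forest.map (·.1) := h.2 e (Nat.lt_succ_self e)
    have hget : (PySem.Dict.mk forest).get? (pvUp forest e v) = some r := by
      rw [l_get?_of_mem forest _ hu, ← l_up_succ', h.1]
    have := PySem.Dict.mem_items_of_get?_eq_some _ hget
    exact Or.inr (List.mem_map.mpr ⟨(pvUp forest e v, r), this, rfl⟩)

-- B's running-best fold: its result is the lexicographic best (max depth, then min root)
theorem l_best (cp : Int → Int × Int) :
    ∀ (l : List Int) (q : Int × Int),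
      ∃ q', l.foldl (fun best node =>
          let p := cp node
          match best with
          | none => some (p.2, p.1)
          | some q => if p.2 > q.1 ∨ (p.2 = q.1 ∧ p.1 < q.2) then some (p.2, p.1) else some q)
          (some q) = some q' ∧
        (q' = q ∨ ∃ v ∈ l, q' = ((cp v).2, (cp v).1)) ∧
        (q.1 < q'.1 ∨ (q.1 = q'.1 ∧ q'.2 ≤ q.2)) ∧
        (∀ v ∈ l, (cp v).2 < q'.1 ∨ ((cp v).2 = q'.1 ∧ q'.2 ≤ (cp v).1)) := by
  intro l
  induction l with
  | nil =>
    intro q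
    exact ⟨q, rfl, Or.inl rfl, Or.inr ⟨rfl, le_refl _⟩, by simp⟩
  | cons v t ih =>
    intro q
    simp only [List.foldl_cons]
    by_cases hcond : (cp v).2 > q.1 ∨ ((cp v).2 = q.1 ∧ (cp v).1 < q.2)
    · rw [if_pos hcond]
      obtain ⟨q', hfold, horig, hbet, hdom⟩ := ih ((cp v).2, (cp v).1)
      dsimp only at hbet
      refine ⟨q', hfold, ?_, ?_, ?_⟩
      · rcases horig with rfl | ⟨w, hw, rfl⟩
        · exact Or.inr ⟨v, List.mem_cons_self, rfl⟩
        · exact Or.inr ⟨w, List.mem_cons_of_mem v hw, rfl⟩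
      · rcases hbet with hb | ⟨hb1, hb2⟩ <;> rcases hcond with hc | ⟨hc1, hc2⟩ <;>
          [exact Or.inl (by omega); exact Or.inl (by omega);
           exact Or.inl (by omega); exact Or.inr ⟨by omega, by omega⟩]
      · intro w hw
        rcases List.mem_cons.mp hw with rfl | hmem
        · rcases hbet with hb | ⟨hb1, hb2⟩
          · exact Or.inl hb
          · exact Or.inr ⟨hb1, hb2⟩
        · exact hdom w hmem
    · rw [if_neg hcond]
      obtain ⟨q', hfold, horig, hbet, hdom⟩ := ih q
      have hnc : (cp v).2 < q.1 ∨ ((cp v).2 = q.1 ∧ q.2 ≤ (cp v).1) := by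
        rcases Int.lt_trichotomy (cp v).2 q.1 with h1 | h1 | h1
        · exact Or.inl h1
        · refine Or.inr ⟨h1, ?_⟩
          by_contra hlt
          exact hcond (Or.inr ⟨h1, by omega⟩)
        · exact absurd (Or.inl h1) hcond
      refine ⟨q', hfold, ?_, hbet, ?_⟩
      · rcases horig with rfl | ⟨w, hw, rfl⟩
        · exact Or.inl rfl
        · exact Or.inr ⟨w, List.mem_cons_of_mem v hw, rfl⟩
      · intro w hw
        rcases List.mem_cons.mp hw with rfl | hmem
        · rcases hnc with h1 | ⟨h1, h2⟩ <;> rcases hbet with hb | ⟨hb1, hb2⟩ <;> omega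
        · exact hdom w hmem

def pvR (forest : List (Int × Int)) : List Int :=
  PySem.Set.diff
    (PySem.Set.union (PySem.Set.ofList (forest.map (·.1))) (forest.map (·.2)))
    (PySem.Set.ofList (forest.map (·.1)))

theorem l_mem_R (forest : List (Int × Int)) (x : Int) :
    x ∈ pvR forest ↔ x ∈ forest.map (·.2) ∧ x ∉ forest.map (·.1) := by
  unfold pvR
  rw [PySem.Set.mem_diff, PySem.Set.mem_union, PySem.Set.mem_ofList]
  constructor
  · rintro ⟨h1 | h1, h2⟩
    · exact absurd h1 h2
    · exact ⟨h1, h2⟩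
  · rintro ⟨h1, h2⟩
    exact ⟨Or.inr h1, h2⟩

theorem l_R_nodup (forest : List (Int × Int)) : (pvR forest).Nodup :=
  PySem.Set.nodup_diff _ _ (PySem.Set.nodup_union _ _ (PySem.Set.nodup_ofList _))

theorem l_R_ne (forest : List (Int × Int))
    (hac : ∀ p ∈ forest, pvUp forest forest.length p.1 ∉ forest.map (·.1))
    (hne : forest ≠ []) : pvR forest ≠ [] := by
  obtain ⟨p, hp⟩ := List.exists_mem_of_ne_nil forest hne
  obtain ⟨e, r, hchain, hrK, _⟩ := l_exit forest hac p.1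
  have hrval : r ∈ forest.map (·.2) := by
    rcases l_root_val forest p.1 r e hchain hrK with rfl | hv
    · exact absurd (List.mem_map.mpr ⟨p, hp, rfl⟩) hrK
    · exact hv
  have : r ∈ pvR forest := (l_mem_R forest r).mpr ⟨hrval, hrK⟩
  exact List.ne_nil_of_mem this

theorem l_A_char (forest : List (Int × Int)) (hnd : (forest.map (·.1)).Nodup)
    (hac : ∀ p ∈ forest, pvUp forest forest.length p.1 ∉ forest.map (·.1))
    (hne : forest ≠ []) :
    ∃ a, tallest_tree_root_variation forest = a ∧ a ∈ pvR forest ∧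
      (∀ r ∈ pvR forest, pvMC forest r ≤ pvMC forest a) ∧
      (∀ r ∈ pvR forest, pvMC forest r = pvMC forest a → a ≤ r) := by
  unfold tallest_tree_root_variation
  rw [if_neg hne]
  dsimp only
  rw [show (forest.foldl (fun a p => a.modify p.2 [] (fun l => l ++ [p.1]))
        PySem.Dict.empty) = pvAdj forest from rfl]
  rw [show PySem.Set.diff
        (PySem.Set.union (PySem.Set.ofList (forest.map (·.1))) (forest.map (·.2)))
        (PySem.Set.ofList (forest.map (·.1))) = pvR forest from rfl]
  -- the root_map built over the (distinct, fresh) roots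
  have hitems : ((pvR forest).foldl
      (fun rm r => rm.insert r (dfsA (pvAdj forest) (forest.length + 1) r))
      (PySem.Dict.empty : PySem.Dict Int Int)).items
      = (pvR forest).map (fun r => (r, dfsA (pvAdj forest) (forest.length + 1) r)) := by
    rw [PySem.Dict.items_foldl_insert_fresh (pvR forest) (fun r => r)
      (fun r => dfsA (pvAdj forest) (forest.length + 1) r) PySem.Dict.empty
      (fun a _ => PySem.Dict.contains_empty a) (by simpa using l_R_nodup forest)]
    rfl
  have hdfs : ∀ r ∈ pvR forest,
      dfsA (pvAdj forest) (forest.length + 1) r = 1 + (pvMC forest r : Int) := by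
    intro r _
    exact l_dfs forest hnd hac (forest.length + 1) r (by have := l_MC_le forest r; omega)
  have hitems2 : ((pvR forest).foldl
      (fun rm r => rm.insert r (dfsA (pvAdj forest) (forest.length + 1) r))
      (PySem.Dict.empty : PySem.Dict Int Int)).items
      = (pvR forest).map (fun r => (r, 1 + (pvMC forest r : Int))) := by
    rw [hitems]
    exact List.map_congr_left (fun r hr => by rw [hdfs r hr])
  have hvals : ((pvR forest).foldl
      (fun rm r => rm.insert r (dfsA (pvAdj forest) (forest.length + 1) r))
      (PySem.Dict.empty : PySem.Dict Int Int)).values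
      = (pvR forest).map (fun r => 1 + (pvMC forest r : Int)) := by
    rw [show ∀ d : PySem.Dict Int Int, d.values = d.items.map (·.2) from fun _ => rfl]
    rw [hitems2, List.map_map]
    rfl
  rw [hvals, hitems2]
  -- the maximum height
  cases hmax : PySem.List.max? ((pvR forest).map (fun r => 1 + (pvMC forest r : Int)))
      (fun v => v) with
  | none =>
    rw [PySem.List.max?_eq_none_iff] at hmax
    exact absurd (List.map_eq_nil_iff.mp hmax) (l_R_ne forest hac hne)
  | some M =>
  have hMmem := PySem.List.max?_mem hmax
  have hMmax := PySem.List.max?_isMax hmax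
  obtain ⟨rM, hrM, hrMeq⟩ := List.mem_map.mp hMmem
  -- ties
  dsimp only
  simp only [PySem.List.foldl_append_if (fun p : Int × Int => p.2 == M) (fun p : Int × Int => p.1)]
  cases hmin : PySem.List.min? ([] ++ (((pvR forest).map
      (fun r => (r, 1 + (pvMC forest r : Int)))).filter (fun p => p.2 == M)).map (fun p => p.1))
      (fun v => v) with
  | none =>
    rw [PySem.List.min?_eq_none_iff] at hmin
    simp only [List.nil_append] at hmin
    have : (rM, 1 + (pvMC forest rM : Int)) ∈ ((pvR forest).map
        (fun r => (r, 1 + (pvMC forest r : Int)))).filter (fun p => p.2 == M) :=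
      List.mem_filter.mpr ⟨List.mem_map.mpr ⟨rM, hrM, rfl⟩, by simp [hrMeq]⟩
    have hm2 : rM ∈ (((pvR forest).map
        (fun r => (r, 1 + (pvMC forest r : Int)))).filter (fun p => p.2 == M)).map
        (fun p : Int × Int => p.1) := List.mem_map.mpr ⟨_, this, rfl⟩
    rw [hmin] at hm2
    simp at hm2
  | some a =>
  have hamem := PySem.List.min?_mem hmin
  have hamin := PySem.List.min?_isMin hmin
  simp only [List.nil_append] at hamem hamin
  obtain ⟨pa, hpa, hpa1⟩ := List.mem_map.mp hamem
  obtain ⟨hpam, hpaM⟩ := List.mem_filter.mp hpa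
  obtain ⟨ra, hra, hraeq⟩ := List.mem_map.mp hpam
  have haR : a ∈ pvR forest := by rw [← hpa1, ← hraeq]; exact hra
  have haM : 1 + (pvMC forest a : Int) = M := by
    have := hpaM
    rw [← hraeq] at this
    simp only [beq_iff_eq] at this
    rw [← hpa1, ← hraeq]
    exact this
  refine ⟨a, rfl, haR, ?_, ?_⟩
  · intro r hr
    have := hMmax _ (List.mem_map.mpr ⟨r, hr, rfl⟩)
    simp only at this
    omega
  · intro r hr hMC
    have hrM' : (1 + (pvMC forest r : Int)) = M := by omega
    have hrt : r ∈ (((pvR forest).map (fun r => (r, 1 + (pvMC forest r : Int)))).filter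
        (fun p => p.2 == M)).map (fun p => p.1) :=
      List.mem_map.mpr ⟨(r, 1 + (pvMC forest r : Int)),
        List.mem_filter.mpr ⟨List.mem_map.mpr ⟨r, hr, rfl⟩, by simp [hrM']⟩, rfl⟩
    exact hamin r hrt

theorem l_B_char (forest : List (Int × Int))
    (hac : ∀ p ∈ forest, pvUp forest forest.length p.1 ∉ forest.map (·.1))
    (hne : forest ≠ []) :
    ∃ b, tallest_tree_root_variation_alt forest = b ∧ b ∈ pvR forest ∧
      (∀ r ∈ pvR forest, pvMC forest r ≤ pvMC forest b) ∧
      (∀ r ∈ pvR forest, pvMC forest r = pvMC forest b → b ≤ r) := by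
  unfold tallest_tree_root_variation_alt
  rw [if_neg hne]
  dsimp only
  -- the iterated node list is nonempty
  obtain ⟨p0, hp0⟩ := List.exists_mem_of_ne_nil forest hne
  have hNmem : p0.1 ∈ PySem.Set.union (PySem.Set.ofList (forest.map (·.1)))
      (forest.map (·.2)) :=
    (PySem.Set.mem_union _ _ _).mpr (Or.inl ((PySem.Set.mem_ofList _ _).mpr
      (List.mem_map.mpr ⟨p0, hp0, rfl⟩)))
  obtain ⟨v0, t, hN⟩ := List.exists_cons_of_ne_nil (List.ne_nil_of_mem hNmem)
  rw [hN]
  simp only [List.foldl_cons]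
  -- run the running-best fold
  obtain ⟨q', hfold, horig, hbet, hdom⟩ :=
    l_best (fun node => climbB forest forest.length node 1) t
      ((climbB forest forest.length v0 1).2, (climbB forest forest.length v0 1).1)
  rw [hfold]
  -- the climb of every node follows its chain to its root
  have hcp : ∀ v : Int, ∃ e r, pvVC forest v e r = true ∧ r ∉ forest.map (·.1) ∧
      e ≤ forest.length ∧ climbB forest forest.length v 1 = (r, 1 + (e : Int)) := by
    intro v
    obtain ⟨e, r, hch, hrK, hen⟩ := l_exit forest hac v
    exact ⟨e, r, hch, hrK, hen, l_climb forest forest.length v e r 1 hch hrK hen⟩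
  -- identify the winning pair
  have horig' : ∃ v, v ∈ v0 :: t ∧
      q' = ((climbB forest forest.length v 1).2, (climbB forest forest.length v 1).1) := by
    rcases horig with rfl | ⟨w, hw, rfl⟩
    · exact ⟨v0, List.mem_cons_self, rfl⟩
    · exact ⟨w, List.mem_cons_of_mem v0 hw, rfl⟩
  obtain ⟨vstar, hvstarN, hq'⟩ := horig'
  obtain ⟨estar, rstar, hchstar, hrstarK, _, hclimbstar⟩ := hcp vstar
  rw [hclimbstar] at hq'
  dsimp only at hq'
  -- dominance over every node of the iterated list
  have hdomAll : ∀ v ∈ v0 :: t,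
      (climbB forest forest.length v 1).2 < q'.1 ∨
      ((climbB forest forest.length v 1).2 = q'.1 ∧
        q'.2 ≤ (climbB forest forest.length v 1).1) := by
    intro v hv
    rcases List.mem_cons.mp hv with rfl | hmem
    · exact hbet
    · exact hdom v hmem
  have hvstarN' : vstar ∈ PySem.Set.union (PySem.Set.ofList (forest.map (·.1)))
      (forest.map (·.2)) := by rw [hN]; exact hvstarN
  -- b = rstar lies in the root set
  have hbR : rstar ∈ pvR forest := by
    rw [l_mem_R]
    refine ⟨?_, hrstarK⟩
    rcases l_root_val forest vstar rstar estar hchstar hrstarK with rfl | hv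
    · rcases (PySem.Set.mem_union _ _ _).mp hvstarN' with hK | hV
      · exact absurd ((PySem.Set.mem_ofList _ _).mp hK) hrstarK
      · exact hV
    · exact hv
  -- dominance transported to every root of the forest
  have hdomR : ∀ r ∈ pvR forest,
      (1 + (pvMC forest r : Int)) < q'.1 ∨
      ((1 + (pvMC forest r : Int)) = q'.1 ∧ q'.2 ≤ r) := by
    intro r hr
    obtain ⟨hrV, hrK⟩ := (l_mem_R forest r).mp hr
    obtain ⟨w, hwm, hwc⟩ := List.any_eq_true.mp (l_MC_ex forest r)
    have hwN : w ∈ v0 :: t := by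
      rw [← hN]
      rcases List.mem_cons.mp hwm with rfl | hK
      · exact (PySem.Set.mem_union _ _ _).mpr (Or.inr hrV)
      · exact (PySem.Set.mem_union _ _ _).mpr (Or.inl ((PySem.Set.mem_ofList _ _).mpr hK))
    have hclimbw : climbB forest forest.length w 1 = (r, 1 + (pvMC forest r : Int)) :=
      l_climb forest forest.length w (pvMC forest r) r 1 hwc hrK (l_MC_le forest r)
    have := hdomAll w hwN
    rw [hclimbw] at this
    dsimp only at this
    exact this
  -- the winner attains the maximal chain length of its own root
  have hestar : (estar : Int) = (pvMC forest rstar : Int) := by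
    have hle : estar ≤ pvMC forest rstar :=
      l_le_MC forest hac estar rstar
        (List.any_eq_true.mpr ⟨vstar, l_src forest vstar estar rstar hchstar, hchstar⟩)
    have := hdomR rstar hbR
    rw [hq'] at this
    dsimp only at this
    rcases this with hlt | ⟨heq, _⟩
    · exfalso
      have : (pvMC forest rstar : Int) < (estar : Int) := by omega
      omega
    · omega
  have hq1 : q'.1 = 1 + (pvMC forest rstar : Int) := by rw [hq']; dsimp only; omega
  have hq2 : q'.2 = rstar := by rw [hq']
  refine ⟨q'.2, rfl, by rw [hq2]; exact hbR, ?_, ?_⟩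
  · intro r hr
    rcases hdomR r hr with hlt | ⟨heq, _⟩ <;>
      · rw [hq1] at *
        rw [hq2]
        omega
  · intro r hr hMC
    rw [hq2] at hMC ⊢
    rcases hdomR r hr with hlt | ⟨_, hle⟩
    · rw [hq1] at hlt; omega
    · rw [hq2] at hle; exact hle

-- ===== VERDICT (by name: the statement is the Claim_ definition above) =====
theorem tallest_tree_root_variation_spec : Claim_equal_tallest_tree_root_variation := by
  intro forest _ hpre
  obtain ⟨hnd, hac⟩ := hpre
  unfold Spec_tallest_tree_root_variation
  by_cases hne : forest = []
  · subst hne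
    rfl
  · obtain ⟨a, hAa, haR, haMax, haMin⟩ := l_A_char forest hnd hac hne
    obtain ⟨b, hBb, hbR, hbMax, hbMin⟩ := l_B_char forest hac hne
    rw [hAa, hBb]
    have h1 : pvMC forest a = pvMC forest b :=
      le_antisymm (hbMax a haR) (haMax b hbR)
    exact le_antisymm (haMin b hbR h1.symm) (hbMin a haR h1)
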